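-- pv_equiv track=rewrite | github.com/ThomasEcalle/python_project | website/views/launch_tournament.py | getAdditionalPlayers
-- ===== SOURCE A (Python) =====
-- def getAdditionalPlayers(players):
--     """ looks for 'additional users' that would make our tree not a perfect one """
--     i = 0;
--     additionalPlayersCount = 0;
--
--     while 2 ** i <= len(players):
--         additionalPlayersCount = len(players) - (2 ** i)
--         i += 1
--     if len(players) % 4 == 0 or len(players) == 2:
--         additionalPlayersCount = 0;
--         i -= 1
--
--     return (additionalPlayersCount, i)
-- ===== SOURCE B (Python) =====
-- def getAdditionalPlayers(players):
--     """ looks for 'additional users' that would make our tree not a perfect one """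
--     n = len(players)
--     i = n.bit_length()
--     count = n - (1 << (i - 1)) if n else 0
--     if n % 4 == 0 or n == 2:
--         return (0, i - 1)
--     return (count, i)
-- ===== Notes on version B (the rewrite author's own statement) =====
-- stated objective: simpler
-- what changed: Replaces the iterative power-of-two search loop with a closed-form bit_length() computation (i = n.bit_length(), count = n - 2**(i-1) for n>0), keeping the final %4/==2 adjustment.
import Mathlib
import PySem

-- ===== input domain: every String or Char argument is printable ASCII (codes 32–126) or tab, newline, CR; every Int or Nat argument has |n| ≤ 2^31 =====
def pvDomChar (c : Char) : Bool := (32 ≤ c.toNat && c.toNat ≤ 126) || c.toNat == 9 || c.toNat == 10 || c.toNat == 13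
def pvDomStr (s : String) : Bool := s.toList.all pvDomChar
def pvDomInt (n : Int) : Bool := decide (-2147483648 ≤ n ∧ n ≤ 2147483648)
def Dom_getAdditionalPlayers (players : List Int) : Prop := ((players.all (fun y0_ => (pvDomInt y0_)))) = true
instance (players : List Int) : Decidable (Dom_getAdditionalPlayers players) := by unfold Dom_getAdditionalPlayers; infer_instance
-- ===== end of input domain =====

-- B replaces A's iterative power-of-two search with a closed-form bit-length computation (simpler).

-- ===== PORT A =====
-- the while loop of A: while 2**i <= n: count = n - 2**i; i += 1
def pvLoopA (n : Nat) (i : Nat) (count : Int) : Int × Int :=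
  if 2 ^ i ≤ n then pvLoopA n (i + 1) ((n : Int) - 2 ^ i) else (count, (i : Int))
termination_by n + 1 - 2 ^ i
decreasing_by
  have h1 : 2 ^ i < 2 ^ (i + 1) := Nat.pow_lt_pow_succ (by norm_num)
  omega

def getAdditionalPlayers (players : List Int) : Int × Int :=
  let n := players.length
  let r := pvLoopA n 0 0
  if n % 4 == 0 || n == 2 then (0, r.2 - 1) else r

-- ===== PORT B =====
-- n.bit_length() is Nat.size n; 1 << (i - 1) is 2 ^ (i - 1)
def getAdditionalPlayers_alt (players : List Int) : Int × Int :=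
  let n := players.length
  let i : Int := (Nat.size n : Int)
  let count : Int := if n ≠ 0 then (n : Int) - 2 ^ (Nat.size n - 1) else 0
  if n % 4 == 0 || n == 2 then (0, i - 1) else (count, i)

-- ===== PRECONDITION & SPEC =====
def Spec_getAdditionalPlayers (players : List Int) (out : Int × Int) : Prop := out = getAdditionalPlayers_alt players
instance (players : List Int) (out : Int × Int) : Decidable (Spec_getAdditionalPlayers players out) := by unfold Spec_getAdditionalPlayers; infer_instance

-- ===== CLAIM (what is proved, stated in full; the proofs are below) =====
def Claim_equal_getAdditionalPlayers : Prop := ∀ (players : List Int), Dom_getAdditionalPlayers players → Spec_getAdditionalPlayers players (getAdditionalPlayers players)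

-- ===== LEMMAS AND PROOFS =====

lemma pvLoopA_eq (n i : Nat) (count : Int) (h : 2 ^ i ≤ n) :
    pvLoopA n i count = ((n : Int) - 2 ^ (Nat.size n - 1), (Nat.size n : Int)) := by
  rw [pvLoopA]
  simp only [h, if_true]
  by_cases h2 : 2 ^ (i + 1) ≤ n
  · exact pvLoopA_eq n (i + 1) _ h2
  · rw [pvLoopA]
    simp only [h2, if_false]
    have hs : Nat.size n = i + 1 := by
      have hlt : i < Nat.size n := Nat.lt_size.mpr h
      have hle : Nat.size n ≤ i + 1 := Nat.size_le.mpr (by omega)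
      omega
    simp [hs]
termination_by n + 1 - 2 ^ i
decreasing_by
  have h1 : 2 ^ i < 2 ^ (i + 1) := Nat.pow_lt_pow_succ (by norm_num)
  omega

-- ===== VERDICT (by name: the statement is the Claim_ definition above) =====
theorem getAdditionalPlayers_spec : Claim_equal_getAdditionalPlayers := by
  intro players _
  unfold Spec_getAdditionalPlayers getAdditionalPlayers getAdditionalPlayers_alt
  by_cases hn : players.length = 0
  · simp [hn, pvLoopA, Nat.size_zero]
  · have h0 : 2 ^ 0 ≤ players.length := by omega
    simp only [pvLoopA_eq _ _ _ h0, hn, ne_eq, not_false_iff, if_true]
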